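-- pv_equiv track=rewrite | github.com/estebannoemr/pandalyze-backend-fork | app/endpoints/stats.py | _bucket_label_for
-- ===== SOURCE A (Python) =====
-- _TIME_BUCKETS = [
--     (0, 30, "0-30s"),
--     (30, 60, "30s-1m"),
--     (60, 120, "1-2m"),
--     (120, 300, "2-5m"),
--     (300, 600, "5-10m"),
--     (600, None, "10m+"),
-- ]
--
-- def _bucket_label_for(active_seconds):
--     if active_seconds is None:
--         return None
--     s = int(active_seconds)
--     if s < 0:
--         s = 0
--     for lo, hi, label in _TIME_BUCKETS:
--         if hi is None and s >= lo:
--             return label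
--         if lo <= s < hi:
--             return label
--     return _TIME_BUCKETS[-1][2]
-- ===== SOURCE B (Python) =====
-- _BOUNDARIES = [30, 60, 120, 300, 600]
-- _LABELS = ["0-30s", "30s-1m", "1-2m", "2-5m", "5-10m", "10m+"]
--
--
-- def _bisect_right(a, x):
--     lo, hi = 0, len(a)
--     while lo < hi:
--         mid = (lo + hi) // 2
--         if x < a[mid]:
--             hi = mid
--         else:
--             lo = mid + 1
--     return lo
--
--
-- def _bucket_label_for(active_seconds):
--     if active_seconds is None:
--         return None
--     s = int(active_seconds)
--     if s < 0:
--         s = 0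
--     return _LABELS[_bisect_right(_BOUNDARIES, s)]
-- ===== Notes on version B (the rewrite author's own statement) =====
-- stated objective: alternative
-- what changed: Replaced the linear scan over (lo, hi, label) tuples with a binary search (hand-written bisect_right) over a sorted boundary array paired with a parallel label array.
import Mathlib
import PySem

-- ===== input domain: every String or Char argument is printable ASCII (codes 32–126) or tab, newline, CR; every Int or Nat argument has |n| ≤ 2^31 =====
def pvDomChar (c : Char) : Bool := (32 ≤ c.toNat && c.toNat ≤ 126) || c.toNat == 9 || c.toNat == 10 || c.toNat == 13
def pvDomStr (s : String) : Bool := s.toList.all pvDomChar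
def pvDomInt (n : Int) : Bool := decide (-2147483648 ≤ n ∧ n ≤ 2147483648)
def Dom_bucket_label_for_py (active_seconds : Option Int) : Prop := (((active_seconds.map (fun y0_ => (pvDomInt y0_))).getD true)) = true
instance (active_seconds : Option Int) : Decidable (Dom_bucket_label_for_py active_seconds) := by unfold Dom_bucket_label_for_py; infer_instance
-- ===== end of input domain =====

-- B replaces A's linear scan over (lo, hi, label) tuples by a hand-written
-- binary search over a sorted boundary array with a parallel label array
-- (objective: alternative algorithm; same None guard and negative clamp).

-- ===== PORT A =====
-- _TIME_BUCKETS: hi = none encodes Python's None upper bound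
def pvTimeBuckets : List (Int × Option Int × String) :=
  [(0, some 30, "0-30s"), (30, some 60, "30s-1m"), (60, some 120, "1-2m"),
   (120, some 300, "2-5m"), (300, some 600, "5-10m"), (600, none, "10m+")]

-- the for-loop of A: returns the first matching label, none if the loop falls through
-- (the branch 'lo <= s < hi' with hi = None would raise in Python; it is unreachable
-- for pvTimeBuckets, here it simply does not match)
def pvLoopA (s : Int) : List (Int × Option Int × String) → Option String
  | [] => none
  | (lo, hi, label) :: rest =>
    match hi with
    | none => if s ≥ lo then some label else pvLoopA s rest
    | some h => if lo ≤ s ∧ s < h then some label else pvLoopA s rest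

def bucket_label_for_py (active_seconds : Option Int) : Option String :=
  match active_seconds with
  | none => none
  | some n =>
    let s : Int := if n < 0 then 0 else n
    match pvLoopA s pvTimeBuckets with
    | some label => some label
    | none => some "10m+"   -- return _TIME_BUCKETS[-1][2]

-- ===== PORT B =====
def pvBoundaries : List Int := [30, 60, 120, 300, 600]
def pvLabels : List String := ["0-30s", "30s-1m", "1-2m", "2-5m", "5-10m", "10m+"]

-- hand-written bisect_right from Source B (the while-loop as recursion on hi - lo)
def pvBisectRight (a : List Int) (x : Int) (lo hi : Nat) : Nat :=
  if _h : lo < hi then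
    let mid := (lo + hi) / 2
    if x < a.getD mid 0 then pvBisectRight a x lo mid
    else pvBisectRight a x (mid + 1) hi
  else lo
termination_by hi - lo
decreasing_by all_goals omega

def bucket_label_for_py_alt (active_seconds : Option Int) : Option String :=
  match active_seconds with
  | none => none
  | some n =>
    let s : Int := if n < 0 then 0 else n
    PySem.List.pyGet? pvLabels (pvBisectRight pvBoundaries s 0 pvBoundaries.length : Int)

-- ===== PRECONDITION & SPEC =====
def Spec_bucket_label_for_py (active_seconds : Option Int) (out : Option String) : Prop := out = bucket_label_for_py_alt active_seconds
instance (active_seconds : Option Int) (out : Option String) : Decidable (Spec_bucket_label_for_py active_seconds out) := by unfold Spec_bucket_label_for_py; infer_instance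

-- ===== CLAIM (what is proved, stated in full; the proofs are below) =====
def Claim_equal_bucket_label_for_py : Prop := ∀ (active_seconds : Option Int), Dom_bucket_label_for_py active_seconds → Spec_bucket_label_for_py active_seconds (bucket_label_for_py active_seconds)

-- ===== LEMMAS AND PROOFS =====
theorem pvBisect_eval (x : Int) :
    pvBisectRight pvBoundaries x 0 5 =
      if x < 120 then (if x < 60 then (if x < 30 then 0 else 1) else 2)
      else if x < 300 then 3 else if x < 600 then 4 else 5 := by
  by_cases h1 : x < 30
  · simp [pvBisectRight, pvBoundaries, h1, show x < 60 by omega, show x < 120 by omega]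
  · by_cases h2 : x < 60
    · simp [pvBisectRight, pvBoundaries, h1, h2, show x < 120 by omega]
    · by_cases h3 : x < 120
      · simp [pvBisectRight, pvBoundaries, h2, h3]
      · by_cases h4 : x < 300
        · simp [pvBisectRight, pvBoundaries, h3, h4, show x < 600 by omega]
        · by_cases h5 : x < 600
          · simp [pvBisectRight, pvBoundaries, h3, h4, h5]
          · simp [pvBisectRight, pvBoundaries, h3, h5, show ¬ x < 300 by omega]

theorem pvCore (s : Int) (hs : 0 ≤ s) :
    (match pvLoopA s pvTimeBuckets with
     | some label => some label
     | none => some "10m+")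
      = PySem.List.pyGet? pvLabels (pvBisectRight pvBoundaries s 0 pvBoundaries.length : Int) := by
  have hlen : pvBoundaries.length = 5 := rfl
  rw [hlen, pvBisect_eval]
  by_cases h1 : s < 30
  · simp [pvLoopA, pvTimeBuckets, pvLabels, PySem.List.pyGet?, PySem.List.pyIdx?,
      h1, hs, show s < 60 by omega, show s < 120 by omega]
  · by_cases h2 : s < 60
    · simp [pvLoopA, pvTimeBuckets, pvLabels, PySem.List.pyGet?, PySem.List.pyIdx?,
        h1, h2, show s < 120 by omega, show (30:Int) ≤ s by omega]
    · by_cases h3 : s < 120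
      · simp [pvLoopA, pvTimeBuckets, pvLabels, PySem.List.pyGet?, PySem.List.pyIdx?,
          h1, h2, h3, show (60:Int) ≤ s by omega]
      · by_cases h4 : s < 300
        · simp [pvLoopA, pvTimeBuckets, pvLabels, PySem.List.pyGet?, PySem.List.pyIdx?,
            h1, h2, h3, h4, show (120:Int) ≤ s by omega]
        · by_cases h5 : s < 600
          · simp [pvLoopA, pvTimeBuckets, pvLabels, PySem.List.pyGet?, PySem.List.pyIdx?,
              h1, h2, h3, h4, h5, show (300:Int) ≤ s by omega]
          · simp [pvLoopA, pvTimeBuckets, pvLabels, PySem.List.pyGet?, PySem.List.pyIdx?,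
              h3, h4, h5, show (600:Int) ≤ s by omega, show ¬ s < 30 by omega,
              show ¬ s < 60 by omega]

theorem bucket_label_for_py_spec : Claim_equal_bucket_label_for_py := by
  intro a _
  show bucket_label_for_py a = bucket_label_for_py_alt a
  cases a with
  | none => rfl
  | some n =>
    simp only [bucket_label_for_py, bucket_label_for_py_alt]
    exact pvCore _ (by split <;> omega)

-- ===== VERDICT (by name: the statement is the Claim_ definition above) =====
-- (the verdict theorem bucket_label_for_py_spec is proved above)
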